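-- pv_equiv track=rewrite | github.com/ghazalkhb/DAET | Code/helpers.py | extract_intervals
-- ===== SOURCE A (Python) =====
-- def extract_intervals(ts):
--     """Convert a sorted list of t-indices (where decision==1) into contiguous intervals."""
--     if not ts:
--         return []
--     out = []
--     s = ts[0]
--     p = ts[0]
--     for t in ts[1:]:
--         if t == p + 1:
--             p = t
--         else:
--             out.append((s, p))
--             s = t
--             p = t
--     out.append((s, p))
--     return out
-- ===== SOURCE B (Python) =====
-- def extract_intervals(ts):
--     """Convert a sorted list of t-indices (where decision==1) into contiguous intervals."""
--     if not ts:
--         return []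
--     pairs = list(zip(ts, ts[1:]))
--     starts = [ts[0]] + [b for a, b in pairs if b != a + 1]
--     ends = [a for a, b in pairs if b != a + 1] + [ts[-1]]
--     return list(zip(starts, ends))
-- ===== Notes on version B (the rewrite author's own statement) =====
-- stated objective: alternative
-- what changed: Replaces the single accumulating loop with state (s,p) by a break-point decomposition: zip adjacent pairs, collect starts/ends at non-consecutive breaks, and zip them into intervals.
import Mathlib
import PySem

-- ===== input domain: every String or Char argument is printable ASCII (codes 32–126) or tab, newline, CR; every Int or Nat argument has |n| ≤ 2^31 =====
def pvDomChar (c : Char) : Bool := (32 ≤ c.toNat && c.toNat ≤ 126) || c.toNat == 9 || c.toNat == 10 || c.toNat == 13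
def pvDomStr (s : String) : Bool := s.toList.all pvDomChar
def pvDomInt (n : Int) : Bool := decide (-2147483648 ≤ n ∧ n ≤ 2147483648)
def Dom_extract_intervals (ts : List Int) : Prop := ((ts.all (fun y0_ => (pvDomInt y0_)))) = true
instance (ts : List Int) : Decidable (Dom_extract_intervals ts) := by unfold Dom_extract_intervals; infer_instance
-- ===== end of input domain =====

-- B replaces A's accumulating loop with a break-point decomposition (zip adjacent pairs,
-- collect starts/ends at breaks, zip them); same return value, same O(n) cost.

-- ===== PORT A =====
-- A: accumulate intervals in `out` while tracking run start `s` and previous element `p`.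
-- Loop body of A (acc = (out, s, p)).
def stepA (acc : List (Int × Int) × Int × Int) (t : Int) : List (Int × Int) × Int × Int :=
  if t = acc.2.2 + 1 then (acc.1, acc.2.1, t) else (acc.1 ++ [(acc.2.1, acc.2.2)], t, t)

def extract_intervals (ts : List Int) : List (Int × Int) :=
  match ts with
  | [] => []
  | t0 :: rest =>
    let st := rest.foldl stepA ([], t0, t0)
    st.1 ++ [(st.2.1, st.2.2)]

-- ===== PORT B =====
-- B: pairs of adjacent elements; starts/ends taken at the non-consecutive breaks; zip them.
def extract_intervals_alt (ts : List Int) : List (Int × Int) :=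
  match ts with
  | [] => []
  | t0 :: rest =>
    let pairs := (t0 :: rest).zip rest
    let breaks := pairs.filter (fun ab => ab.2 != ab.1 + 1)
    let starts := t0 :: breaks.map Prod.snd
    let ends := breaks.map Prod.fst ++ [rest.getLastD t0]   -- ts[-1]
    starts.zip ends

-- ===== PRECONDITION & SPEC =====
def Spec_extract_intervals (ts : List Int) (out : List (Int × Int)) : Prop := out = extract_intervals_alt ts
instance (ts : List Int) (out : List (Int × Int)) : Decidable (Spec_extract_intervals ts out) := by unfold Spec_extract_intervals; infer_instance

-- ===== CLAIM (what is proved, stated in full; the proofs are below) =====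
def Claim_equal_extract_intervals : Prop := ∀ (ts : List Int), Dom_extract_intervals ts → Spec_extract_intervals ts (extract_intervals ts)

-- ===== LEMMAS AND PROOFS =====

-- Common recursive description of the interval list produced from start `s`, previous `p`,
-- and the remaining elements.
def gRun (s p : Int) : List Int → List (Int × Int)
  | [] => [(s, p)]
  | t :: rest => if t = p + 1 then gRun s t rest else (s, p) :: gRun t t rest

lemma A_eq_gRun (rest : List Int) : ∀ (out : List (Int × Int)) (s p : Int),
    (let st := rest.foldl stepA (out, s, p)
     st.1 ++ [(st.2.1, st.2.2)]) = out ++ gRun s p rest := by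
  induction rest with
  | nil => intro out s p; simp [gRun]
  | cons t rest ih =>
    intro out s p
    rw [List.foldl_cons]
    by_cases h : t = p + 1
    · rw [show stepA (out, s, p) t = (out, s, t) by simp [stepA, h], gRun, if_pos h]
      exact ih out s t
    · rw [show stepA (out, s, p) t = (out ++ [(s, p)], t, t) by simp [stepA, h],
          gRun, if_neg h, ih (out ++ [(s, p)]) t t]
      simp

lemma B_eq_gRun (rest : List Int) : ∀ (s p : Int),
    (let breaks := ((p :: rest).zip rest).filter (fun ab => ab.2 != ab.1 + 1)
     (s :: breaks.map Prod.snd).zip (breaks.map Prod.fst ++ [rest.getLastD p]))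
      = gRun s p rest := by
  induction rest with
  | nil => intro s p; simp [gRun]
  | cons t rest ih =>
    intro s p
    simp only [List.zip_cons_cons, gRun]
    by_cases h : t = p + 1
    · rw [List.filter_cons_of_neg (by simp [h]), if_pos h, List.getLastD_cons]
      simpa using ih s t
    · rw [List.filter_cons_of_pos (by simp [h]), if_neg h, List.getLastD_cons]
      simpa using ih t t

-- ===== VERDICT (by name: the statement is the Claim_ definition above) =====
theorem extract_intervals_spec : Claim_equal_extract_intervals := by
  intro ts _
  unfold Spec_extract_intervals extract_intervals extract_intervals_alt
  match ts with
  | [] => rfl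
  | t0 :: rest =>
    simp only
    rw [A_eq_gRun rest [] t0 t0, B_eq_gRun rest t0 t0]
    simp
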